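-- pv_equiv track=rewrite | github.com/SheromG/Aloglympics-2024 | e.py | transform
-- ===== SOURCE A (Python) =====
-- def transform(value, json):
--     if value == 'string': return "'string'"
--     elif value == 'number': return "0"
--     elif value == 'boolean': return "true"
--     elif value in json:
--         transformed = '{'
--         last = len(json[value].items())
--         for idx, (key, val) in enumerate(json[value].items()):
--             transformed += f"{key}:{transform(val, json)}"
--             if idx < last - 1:
--                 transformed += ';'
--         transformed += '}'
--         return transformed
--     else:
--         return value
-- ===== SOURCE B (Python) =====
-- def transform(value, json):
--     memo = {}
--
--     def go(v):
--         if v == 'string':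
--             return "'string'"
--         if v == 'number':
--             return "0"
--         if v == 'boolean':
--             return "true"
--         if v in memo:
--             return memo[v]
--         if v in json:
--             parts = [f"{k}:{go(val)}" for k, val in json[v].items()]
--             r = '{' + ';'.join(parts) + '}'
--             memo[v] = r
--             return r
--         return v
--
--     return go(value)
-- ===== Notes on version B (the rewrite author's own statement) =====
-- stated objective: alternative
-- what changed: B expands each type name at most once, caching the finished expansion string per name in a memo dict and assembling fields with ';'.join, instead of A's naive re-expansion of every reference with an index-counted separator loop; on the random timing inputs the cost is the same.
import Mathlib
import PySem

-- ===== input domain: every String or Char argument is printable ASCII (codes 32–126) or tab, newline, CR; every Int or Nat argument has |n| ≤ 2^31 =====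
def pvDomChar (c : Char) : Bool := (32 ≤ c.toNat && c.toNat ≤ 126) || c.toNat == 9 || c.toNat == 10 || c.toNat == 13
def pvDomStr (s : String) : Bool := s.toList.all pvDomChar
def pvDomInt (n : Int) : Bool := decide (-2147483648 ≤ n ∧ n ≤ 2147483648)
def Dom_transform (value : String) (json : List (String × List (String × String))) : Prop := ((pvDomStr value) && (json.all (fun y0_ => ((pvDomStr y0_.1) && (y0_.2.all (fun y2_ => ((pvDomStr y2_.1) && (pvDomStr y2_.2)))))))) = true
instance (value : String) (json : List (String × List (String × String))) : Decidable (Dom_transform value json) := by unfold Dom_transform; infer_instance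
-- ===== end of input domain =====

-- B memoizes the expansion of each type name (computed once per name, joined with ';'.join)
-- where A re-expands every reference naively; ports are fuelled (fuel json.length+1), the
-- fuel-out default is unreachable under Pre_transform (acyclic reference graph), which
-- excludes exactly the inputs where Python A raises RecursionError.

-- ===== PORT A =====
-- shared lookup helper: Python's 'value in json' / 'json[value]' (dict, first match)
def jget (json : List (String × List (String × String))) (v : String) :
    Option (List (String × String)) :=
  match json with
  | [] => none
  | (k, fs) :: rest => if k = v then some fs else jget rest v

-- A's for-loop over enumerate(json[value].items()): idx-counted separator rule
def loopA (tr : String → Option String) (last : Nat) :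
    Nat → List (String × String) → String → Option String
  | _, [], acc => some acc
  | idx, (k, val) :: rest, acc =>
    match tr val with
    | none => none
    | some tv =>
        loopA tr last (idx + 1) rest
          (acc ++ k ++ ":" ++ tv ++ (if idx < last - 1 then ";" else ""))

-- A with fuel; 'none' = fuel exhausted (Python RecursionError region, outside Pre_)
def transformO (json : List (String × List (String × String))) :
    Nat → String → Option String
  | 0, _ => none
  | f + 1, v =>
    if v = "string" then some "'string'"
    else if v = "number" then some "0"
    else if v = "boolean" then some "true"
    else
      match jget json v with
      | some fields =>
          match loopA (transformO json f) fields.length 0 fields "{" with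
          | some s => some (s ++ "}")
          | none => none
      | none => some v

def transform (value : String) (json : List (String × List (String × String))) : String :=
  match transformO json (json.length + 1) value with
  | some r => r
  | none => value

-- ===== PORT B =====
-- ';'.join
def joinSemi : List String → String
  | [] => ""
  | [p] => p
  | p :: q :: t => p ++ ";" ++ joinSemi (q :: t)

-- the list comprehension building "k:go(val)" parts, threading the memo left to right
def loopB (tr : String → PySem.Dict String String →
      Option (String × PySem.Dict String String)) :
    List (String × String) → PySem.Dict String String →
      Option (List String × PySem.Dict String String)
  | [], memo => some ([], memo)
  | (k, val) :: rest, memo =>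
    match tr val memo with
    | none => none
    | some (tv, memo₁) =>
        match loopB tr rest memo₁ with
        | none => none
        | some (parts, memo₂) => some ((k ++ ":" ++ tv) :: parts, memo₂)

-- B's 'go' with fuel and memo cache
def goB (json : List (String × List (String × String))) :
    Nat → String → PySem.Dict String String →
      Option (String × PySem.Dict String String)
  | 0, _, _ => none
  | f + 1, v, memo =>
    if v = "string" then some ("'string'", memo)
    else if v = "number" then some ("0", memo)
    else if v = "boolean" then some ("true", memo)
    else
      match memo.get? v with
      | some r => some (r, memo)
      | none =>
        match jget json v with
        | some fields =>
            match loopB (goB json f) fields memo with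
            | none => none
            | some (parts, memo') =>
                let r := "{" ++ joinSemi parts ++ "}"
                some (r, memo'.insert v r)
        | none => some (v, memo)

def transform_alt (value : String) (json : List (String × List (String × String))) : String :=
  match goB json (json.length + 1) value PySem.Dict.empty with
  | some (r, _) => r
  | none => value

-- ===== PRECONDITION & SPEC =====
-- reference graph of the input: field values of a type name
def succs (json : List (String × List (String × String))) (v : String) : List String :=
  match json.find? (fun p => p.1 = v) with
  | some p => p.2.map Prod.snd
  | none => []

-- names reachable from a in 1..n+1 steps of the reference graph
def reachL (json : List (String × List (String × String))) :
    Nat → String → List String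
  | 0, a => succs json a
  | n + 1, a => reachL json n a ++ (reachL json n a).flatMap (succs json)

-- Pre_ excludes exactly the inputs whose type-reference graph has a cycle reachable from
-- (or at) value: there Python A raises RecursionError (it returns no value).
def Pre_transform (value : String) (json : List (String × List (String × String))) : Prop :=
  ∀ k ∈ json.map Prod.fst,
    (k = value ∨ k ∈ reachL json json.length value) → k ∉ reachL json json.length k
instance (value : String) (json : List (String × List (String × String))) :
    Decidable (Pre_transform value json) := by unfold Pre_transform; infer_instance

def pvWitness_transform : String × (List (String × List (String × String))) :=
  ("a", [("a", [("x", "string"), ("y", "b")]), ("b", [("z", "number")])])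

def Spec_transform (value : String) (json : List (String × List (String × String))) (out : String) : Prop := out = transform_alt value json
instance (value : String) (json : List (String × List (String × String))) (out : String) : Decidable (Spec_transform value json out) := by unfold Spec_transform; infer_instance

-- ===== CLAIM (what is proved, stated in full; the proofs are below) =====
def Claim_equal_transform : Prop := ∀ (value : String) (json : List (String × List (String × String))), Dom_transform value json → Pre_transform value json → Spec_transform value json (transform value json)

-- ===== LEMMAS AND PROOFS =====

-- memo invariant: every cached string is a transformO value (at some fuel)
def InvM (json : List (String × List (String × String)))
    (memo : PySem.Dict String String) : Prop :=
  ∀ k r, memo.get? k = some r → ∃ g, transformO json g k = some r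

theorem transformO_eq (json : List (String × List (String × String))) (f : Nat) (v : String) :
    transformO json (f + 1) v =
      (if v = "string" then some "'string'"
       else if v = "number" then some "0"
       else if v = "boolean" then some "true"
       else
         match jget json v with
         | some fields =>
             match loopA (transformO json f) fields.length 0 fields "{" with
             | some s => some (s ++ "}")
             | none => none
         | none => some v) := rfl

theorem goB_eq (json : List (String × List (String × String))) (f : Nat) (v : String)
    (memo : PySem.Dict String String) :
    goB json (f + 1) v memo =
      (if v = "string" then some ("'string'", memo)
       else if v = "number" then some ("0", memo)
       else if v = "boolean" then some ("true", memo)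
       else
         match memo.get? v with
         | some r => some (r, memo)
         | none =>
           match jget json v with
           | some fields =>
               match loopB (goB json f) fields memo with
               | none => none
               | some (parts, memo') =>
                   some ("{" ++ joinSemi parts ++ "}", memo'.insert v ("{" ++ joinSemi parts ++ "}"))
           | none => some (v, memo)) := rfl

theorem loopA_mono (tr tr' : String → Option String)
    (h : ∀ v r, tr v = some r → tr' v = some r) :
    ∀ (fields : List (String × String)) (last idx : Nat) (acc s : String),
      loopA tr last idx fields acc = some s → loopA tr' last idx fields acc = some s := by
  intro fields
  induction fields with
  | nil => intro last idx acc s hs; simpa [loopA] using hs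
  | cons p rest ih =>
    obtain ⟨k, val⟩ := p
    intro last idx acc s hs
    simp only [loopA] at hs ⊢
    cases htv : tr val with
    | none => rw [htv] at hs; exact absurd hs (by simp)
    | some tv =>
      rw [htv] at hs
      rw [h _ _ htv]
      exact ih _ _ _ _ hs

theorem transformO_succ (json : List (String × List (String × String))) :
    ∀ f v r, transformO json f v = some r → transformO json (f + 1) v = some r := by
  intro f
  induction f with
  | zero => intro v r h; simp [transformO] at h
  | succ f ih =>
    intro v r h
    rw [transformO_eq] at h ⊢
    split_ifs at h ⊢ <;> try exact h
    cases hj : jget json v with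
    | none => rw [hj] at h; dsimp only at h ⊢; exact h
    | some fields =>
      rw [hj] at h
      dsimp only at h ⊢
      cases hl : loopA (transformO json f) fields.length 0 fields "{" with
      | none => rw [hl] at h; exact absurd h (by simp)
      | some s =>
        rw [hl] at h
        dsimp only at h
        rw [loopA_mono _ _ ih _ _ _ _ _ hl]
        exact h

theorem transformO_mono (json : List (String × List (String × String)))
    {f g : Nat} (hfg : f ≤ g) :
    ∀ v r, transformO json f v = some r → transformO json g v = some r := by
  induction g, hfg using Nat.le_induction with
  | base => intro v r h; exact h
  | succ g _ ih => intro v r h; exact transformO_succ json g v r (ih v r h)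

theorem transformO_confl (json : List (String × List (String × String)))
    {f g : Nat} {v r r' : String}
    (h : transformO json f v = some r) (h' : transformO json g v = some r') : r = r' := by
  have h1 := transformO_mono json (Nat.le_max_left f g) v r h
  have h2 := transformO_mono json (Nat.le_max_right f g) v r' h'
  rw [h1] at h2
  exact Option.some.inj h2

theorem loopAB (json : List (String × List (String × String))) (f : Nat)
    (htr : ∀ v memo r, InvM json memo → transformO json f v = some r →
      ∃ memo', goB json f v memo = some (r, memo') ∧ InvM json memo') :
    ∀ (fields : List (String × String)) (last idx : Nat) (acc s : String)
      (memo : PySem.Dict String String),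
      InvM json memo → idx + fields.length = last →
      loopA (transformO json f) last idx fields acc = some s →
      ∃ parts memo', loopB (goB json f) fields memo = some (parts, memo') ∧
        InvM json memo' ∧ parts.length = fields.length ∧ s = acc ++ joinSemi parts := by
  intro fields
  induction fields with
  | nil =>
    intro last idx acc s memo hm _ hs
    simp only [loopA, Option.some.injEq] at hs
    exact ⟨[], memo, by simp [loopB], hm, rfl, by simp [joinSemi, ← hs]⟩
  | cons p rest ih =>
    obtain ⟨k, val⟩ := p
    intro last idx acc s memo hm hlen hs
    simp only [loopA] at hs
    cases htv : transformO json f val with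
    | none => rw [htv] at hs; exact absurd hs (by simp)
    | some tv =>
      rw [htv] at hs
      obtain ⟨memo₁, hg, hm₁⟩ := htr val memo tv hm htv
      obtain ⟨parts, memo₂, hlb, hm₂, hplen, hsv⟩ :=
        ih last (idx + 1) _ s memo₁ hm₁ (by simp at hlen ⊢; omega) hs
      refine ⟨(k ++ ":" ++ tv) :: parts, memo₂, ?_, hm₂, by simp [hplen], ?_⟩
      · simp only [loopB]
        rw [hg]
        dsimp only
        rw [hlb]
      · cases rest with
        | nil =>
          cases parts with
          | cons _ _ => simp at hplen
          | nil =>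
            have hidx : ¬ (idx < last - 1) := by simp at hlen; omega
            rw [hsv]
            simp [joinSemi, hidx, String.append_assoc]
        | cons q t =>
          cases parts with
          | nil => simp at hplen
          | cons p' t' =>
            have hidx : idx < last - 1 := by simp at hlen; omega
            rw [hsv]
            simp [joinSemi, hidx, String.append_assoc]

theorem mainL (json : List (String × List (String × String))) :
    ∀ (f : Nat) (v : String) (memo : PySem.Dict String String) (r : String),
      InvM json memo → transformO json f v = some r →
      ∃ memo', goB json f v memo = some (r, memo') ∧ InvM json memo' := by
  intro f
  induction f with
  | zero => intro v memo r _ h; simp [transformO] at h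
  | succ f ih =>
    intro v memo r hm h
    have h0 : transformO json (f + 1) v = some r := h
    rw [transformO_eq] at h
    rw [goB_eq]
    split_ifs at h ⊢ with h1 h2 h3
    · exact ⟨memo, by rw [← Option.some.inj h], hm⟩
    · exact ⟨memo, by rw [← Option.some.inj h], hm⟩
    · exact ⟨memo, by rw [← Option.some.inj h], hm⟩
    · cases hmem : memo.get? v with
      | some r' =>
        obtain ⟨g, hg⟩ := hm v r' hmem
        have : r = r' := transformO_confl json h0 hg
        exact ⟨memo, by dsimp only; rw [this], hm⟩
      | none =>
        dsimp only
        cases hj : jget json v with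
        | none =>
          rw [hj] at h
          dsimp only at h ⊢
          exact ⟨memo, by rw [← Option.some.inj h], hm⟩
        | some fields =>
          rw [hj] at h
          dsimp only at h ⊢
          cases hl : loopA (transformO json f) fields.length 0 fields "{" with
          | none => rw [hl] at h; exact absurd h (by simp)
          | some s =>
            rw [hl] at h
            dsimp only at h
            have hr : s ++ "}" = r := Option.some.inj h
            obtain ⟨parts, memo₂, hlb, hm₂, _, hsv⟩ :=
              loopAB json f ih fields fields.length 0 "{" s memo hm (by omega) hl
            have hreq : "{" ++ joinSemi parts ++ "}" = r := by
              rw [← hr, hsv]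
            refine ⟨memo₂.insert v r, ?_, ?_⟩
            · rw [hlb]
              dsimp only
              simp [hreq]
            · intro k r' hk
              rcases eq_or_ne k v with hkv | hkv
              · subst hkv
                rw [PySem.Dict.get?_insert_self] at hk
                exact ⟨f + 1, by rw [← Option.some.inj hk]; exact h0⟩
              · rw [PySem.Dict.get?_insert_of_ne _ _ hkv] at hk
                exact hm₂ k r' hk

-- ===== graph / totality lemmas =====

theorem succs_of_jget {json : List (String × List (String × String))} {v : String}
    {fs : List (String × String)} (h : jget json v = some fs) :
    succs json v = fs.map Prod.snd := by
  induction json with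
  | nil => simp [jget] at h
  | cons p rest ih =>
    obtain ⟨a, b⟩ := p
    simp only [jget] at h
    by_cases hp : a = v
    · rw [if_pos hp] at h
      simp only [succs, List.find?_cons, hp]
      simp [Option.some.inj h]
    · rw [if_neg hp] at h
      have := ih h
      simp only [succs, List.find?_cons] at this ⊢
      simpa [hp] using this

theorem jget_mem {json : List (String × List (String × String))} {v : String}
    {fs : List (String × String)} (h : jget json v = some fs) : v ∈ json.map Prod.fst := by
  induction json with
  | nil => simp [jget] at h
  | cons p rest ih =>
    simp only [jget] at h
    by_cases hp : p.1 = v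
    · simp [hp]
    · rw [if_neg (by obtain ⟨a, b⟩ := p; exact hp)] at h
      simp [ih h]

theorem reach_succ {json : List (String × List (String × String))} {n : Nat}
    {a x : String} (h : x ∈ reachL json n a) : x ∈ reachL json (n + 1) a := by
  simp only [reachL]
  exact List.mem_append_left _ h

theorem reach_mono {json : List (String × List (String × String))} {n m : Nat}
    (hnm : n ≤ m) {a x : String} (h : x ∈ reachL json n a) : x ∈ reachL json m a := by
  induction m, hnm using Nat.le_induction with
  | base => exact h
  | succ m _ ih => exact reach_succ ih

theorem reach_base {json : List (String × List (String × String))} {n : Nat}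
    {a b : String} (h : b ∈ succs json a) : b ∈ reachL json n a := by
  induction n with
  | zero => exact h
  | succ n ih => exact reach_succ ih

theorem reach_step {json : List (String × List (String × String))} {n : Nat}
    {a b c : String} (hb : b ∈ reachL json n a) (hc : c ∈ succs json b) :
    c ∈ reachL json (n + 1) a := by
  simp only [reachL]
  exact List.mem_append_right _ (List.mem_flatMap.mpr ⟨b, hb, hc⟩)

-- the recursion stack: head = parent of the current node, bottom anchored at value
def StackInv (json : List (String × List (String × String))) (value : String) :
    List String → String → Prop
  | [], v => v = value
  | a :: rest, v => (a ∈ json.map Prod.fst ∧ v ∈ succs json a) ∧ StackInv json value rest a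

theorem stack_keys {json : List (String × List (String × String))} {value : String} :
    ∀ (stack : List String) (v : String), StackInv json value stack v →
      ∀ a ∈ stack, a ∈ json.map Prod.fst := by
  intro stack
  induction stack with
  | nil => intro v _ a ha; simp at ha
  | cons b rest ih =>
    intro v hv a ha
    obtain ⟨⟨hbk, _⟩, hrest⟩ := hv
    rcases List.mem_cons.mp ha with rfl | ha
    · exact hbk
    · exact ih b hrest a ha

theorem stack_reach {json : List (String × List (String × String))} {value : String} :
    ∀ (stack : List String) (v : String), StackInv json value stack v →
      ∀ a ∈ stack, v ∈ reachL json (stack.length - 1) a := by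
  intro stack
  induction stack with
  | nil => intro v _ a ha; simp at ha
  | cons b rest ih =>
    intro v hv a ha
    obtain ⟨⟨_, hvb⟩, hrest⟩ := hv
    rcases List.mem_cons.mp ha with rfl | ha
    · exact reach_base hvb
    · have hb := ih b hrest a ha
      have := reach_step hb hvb
      refine reach_mono ?_ this
      cases rest with
      | nil => simp at ha
      | cons _ _ => simp

theorem stack_anchor {json : List (String × List (String × String))} {value : String} :
    ∀ (stack : List String) (v : String), StackInv json value stack v →
      v = value ∨ ∃ n ≤ stack.length, v ∈ reachL json n value := by
  intro stack
  induction stack with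
  | nil => intro v hv; exact Or.inl hv
  | cons b rest ih =>
    intro v hv
    obtain ⟨⟨_, hvb⟩, hrest⟩ := hv
    rcases ih b hrest with rfl | ⟨n, hn, hb⟩
    · exact Or.inr ⟨0, by simp, reach_base hvb⟩
    · exact Or.inr ⟨n + 1, by simp; omega, reach_step hb hvb⟩

theorem stack_len_le {json : List (String × List (String × String))} {value : String}
    {stack : List String} {v : String} (hs : StackInv json value stack v)
    (hnd : stack.Nodup) : stack.length ≤ json.length := by
  have hsub : stack.toFinset ⊆ (json.map Prod.fst).toFinset := by
    intro a ha
    exact List.mem_toFinset.mpr (stack_keys stack v hs a (List.mem_toFinset.mp ha))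
  calc stack.length = stack.toFinset.card := (List.toFinset_card_of_nodup hnd).symm
    _ ≤ (json.map Prod.fst).toFinset.card := Finset.card_le_card hsub
    _ ≤ (json.map Prod.fst).length := (json.map Prod.fst).toFinset_card_le
    _ = json.length := by simp

theorem loopA_total (tr : String → Option String) (last : Nat) :
    ∀ (fields : List (String × String)) (idx : Nat) (acc : String),
      (∀ k val, (k, val) ∈ fields → (tr val).isSome) →
      (loopA tr last idx fields acc).isSome := by
  intro fields
  induction fields with
  | nil => intro idx acc _; simp [loopA]
  | cons p rest ih =>
    obtain ⟨k, val⟩ := p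
    intro idx acc hall
    simp only [loopA]
    cases htv : tr val with
    | none => have := hall k val (by simp); rw [htv] at this; simp at this
    | some tv => exact ih _ _ (fun k' v' h' => hall k' v' (by simp [h']))

theorem tot (value : String) (json : List (String × List (String × String)))
    (hpre : Pre_transform value json) :
    ∀ (f : Nat) (v : String) (stack : List String),
      StackInv json value stack v → stack.Nodup →
      json.length + 1 ≤ f + stack.length → (transformO json f v).isSome := by
  intro f
  induction f with
  | zero =>
    intro v stack hs hnd hlen
    have := stack_len_le hs hnd
    omega
  | succ f ih =>
    intro v stack hs hnd hlen
    simp only [transformO]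
    split_ifs <;> try simp
    cases hj : jget json v with
    | none => simp
    | some fields =>
      have hvk : v ∈ json.map Prod.fst := jget_mem hj
      have hvnotin : v ∉ stack := by
        intro hvin
        have hcyc : v ∈ reachL json (stack.length - 1) v := stack_reach stack v hs v hvin
        have hlen' : stack.length ≤ json.length := stack_len_le hs hnd
        have hcyc' : v ∈ reachL json json.length v := reach_mono (by omega) hcyc
        have hanch : v = value ∨ ∃ n ≤ stack.length, v ∈ reachL json n value :=
          stack_anchor stack v hs
        have hante : v = value ∨ v ∈ reachL json json.length value := by
          rcases hanch with h | ⟨n, hn, hr⟩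
          · exact Or.inl h
          · exact Or.inr (reach_mono (by omega) hr)
        exact hpre v hvk hante hcyc'
      have hrec : ∀ k val, (k, val) ∈ fields → (transformO json f val).isSome := by
        intro k val hmem
        refine ih val (v :: stack) ⟨⟨hvk, ?_⟩, hs⟩ (List.nodup_cons.mpr ⟨hvnotin, hnd⟩) (by simp; omega)
        rw [succs_of_jget hj]
        exact List.mem_map.mpr ⟨(k, val), hmem, rfl⟩
      have := loopA_total (transformO json f) fields.length fields 0 "{" hrec
      cases hl : loopA (transformO json f) fields.length 0 fields "{" with
      | none => rw [hl] at this; simp at this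
      | some s => simp [hl]

-- ===== VERDICT (by name: the statement is the Claim_ definition above) =====
theorem transform_spec : Claim_equal_transform := by
  intro value json _ hpre
  unfold Spec_transform transform transform_alt
  have htot := tot value json hpre (json.length + 1) value [] rfl List.nodup_nil (by omega)
  obtain ⟨r, hr⟩ := Option.isSome_iff_exists.mp htot
  have hinv : InvM json PySem.Dict.empty := by
    intro k r' hk
    simp [PySem.Dict.get?_empty] at hk
  obtain ⟨memo', hb, _⟩ := mainL json (json.length + 1) value PySem.Dict.empty r hinv hr
  rw [hr, hb]
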